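-- pv_equiv track=rewrite | github.com/mik1264/ccab | tests/test_accessibility.py | categorize_violations
-- ===== SOURCE A (Python) =====
-- def categorize_violations(violations):
--     """Categorize violations by impact level"""
--     categories = {
--         "critical": [],
--         "serious": [],
--         "moderate": [],
--         "minor": []
--     }
--
--     for violation in violations:
--         impact = violation.get("impact", "moderate")
--         categories.get(impact, categories["moderate"]).append(violation)
--
--     return categories
-- ===== SOURCE B (Python) =====
-- def categorize_violations(violations):
--     """Categorize violations by impact level (filter-per-category rewrite)"""
--     order = ["critical", "serious", "moderate", "minor"]
--     known = {"critical", "serious", "moderate", "minor"}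
--
--     def norm(v):
--         impact = v.get("impact", "moderate")
--         return impact if impact in known else "moderate"
--
--     return {cat: [v for v in violations if norm(v) == cat] for cat in order}
-- ===== Notes on version B (the rewrite author's own statement) =====
-- stated objective: alternative
-- what changed: Replaces the single stateful bucketing pass (mutating lists held in a dict, with aliasing for unknown impacts) by a dict comprehension that makes one filtering scan per category using a normalized impact key.
import Mathlib
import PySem

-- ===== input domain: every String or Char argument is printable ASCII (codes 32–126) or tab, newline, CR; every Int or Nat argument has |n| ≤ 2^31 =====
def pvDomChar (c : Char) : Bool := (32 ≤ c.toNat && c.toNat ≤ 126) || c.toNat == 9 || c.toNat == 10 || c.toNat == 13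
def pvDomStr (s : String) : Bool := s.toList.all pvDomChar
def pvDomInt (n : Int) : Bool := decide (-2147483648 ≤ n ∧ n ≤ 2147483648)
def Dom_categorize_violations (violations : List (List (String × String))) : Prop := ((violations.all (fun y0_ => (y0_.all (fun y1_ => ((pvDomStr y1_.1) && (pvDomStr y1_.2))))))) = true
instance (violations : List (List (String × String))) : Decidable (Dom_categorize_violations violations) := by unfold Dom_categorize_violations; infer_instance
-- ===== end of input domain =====

-- B replaces A's single stateful bucketing pass by one filtering scan per category (alternative decomposition, same results).

-- ===== PORT A =====
-- categories.get(impact, categories["moderate"]).append(violation): the list object is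
-- shared with the dict entry, so the append lands at key 'impact' if present, else at "moderate".
def pvAppendAt (cats : List (String × List (List (String × String)))) (key : String)
    (v : List (String × String)) : List (String × List (List (String × String))) :=
  cats.map (fun p => if p.1 == key then (p.1, p.2 ++ [v]) else p)

def categorize_violations (violations : List (List (String × String))) : List (String × List (List (String × String))) :=
  violations.foldl
    (fun cats v =>
      let impact := (PySem.Dict.mk v).getD "impact" "moderate"
      let key := if (cats.map Prod.fst).contains impact then impact else "moderate"
      pvAppendAt cats key v)
    [("critical", []), ("serious", []), ("moderate", []), ("minor", [])]

-- ===== PORT B =====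
def pvNorm (v : List (String × String)) : String :=
  let impact := (PySem.Dict.mk v).getD "impact" "moderate"
  if impact ∈ ["critical", "serious", "moderate", "minor"] then impact else "moderate"

def categorize_violations_alt (violations : List (List (String × String))) : List (String × List (List (String × String))) :=
  ["critical", "serious", "moderate", "minor"].map
    (fun cat => (cat, violations.filter (fun v => pvNorm v == cat)))

-- ===== PRECONDITION & SPEC =====
def Spec_categorize_violations (violations : List (List (String × String))) (out : List (String × List (List (String × String)))) : Prop := out = categorize_violations_alt violations
instance (violations : List (List (String × String))) (out : List (String × List (List (String × String)))) : Decidable (Spec_categorize_violations violations out) := by unfold Spec_categorize_violations; infer_instance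

-- ===== CLAIM (what is proved, stated in full; the proofs are below) =====
def Claim_equal_categorize_violations : Prop := ∀ (violations : List (List (String × String))), Dom_categorize_violations violations → Spec_categorize_violations violations (categorize_violations violations)

-- ===== LEMMAS AND PROOFS =====

theorem fold_buckets (vs : List (List (String × String)))
    (a b c d : List (List (String × String))) :
    vs.foldl
      (fun cats v =>
        let impact := (PySem.Dict.mk v).getD "impact" "moderate"
        let key := if (cats.map Prod.fst).contains impact then impact else "moderate"
        pvAppendAt cats key v)
      [("critical", a), ("serious", b), ("moderate", c), ("minor", d)]
    = [("critical", a ++ vs.filter (fun v => pvNorm v == "critical")),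
       ("serious",  b ++ vs.filter (fun v => pvNorm v == "serious")),
       ("moderate", c ++ vs.filter (fun v => pvNorm v == "moderate")),
       ("minor",    d ++ vs.filter (fun v => pvNorm v == "minor"))] := by
  induction vs generalizing a b c d with
  | nil => simp
  | cons v vs ih =>
    simp only [List.foldl_cons]
    by_cases h1 : (PySem.Dict.mk v).getD "impact" "moderate" = "critical"
    · have hn : pvNorm v = "critical" := by simp [pvNorm, h1]
      simpa [pvAppendAt, h1, List.filter_cons, hn, List.append_assoc]
        using ih (a ++ [v]) b c d
    · by_cases h2 : (PySem.Dict.mk v).getD "impact" "moderate" = "serious"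
      · have hn : pvNorm v = "serious" := by simp [pvNorm, h2]
        simpa [pvAppendAt, h2, List.filter_cons, hn, List.append_assoc]
          using ih a (b ++ [v]) c d
      · by_cases h3 : (PySem.Dict.mk v).getD "impact" "moderate" = "moderate"
        · have hn : pvNorm v = "moderate" := by simp [pvNorm, h3]
          simpa [pvAppendAt, h3, List.filter_cons, hn, List.append_assoc]
            using ih a b (c ++ [v]) d
        · by_cases h4 : (PySem.Dict.mk v).getD "impact" "moderate" = "minor"
          · have hn : pvNorm v = "minor" := by simp [pvNorm, h4]
            simpa [pvAppendAt, h4, List.filter_cons, hn, List.append_assoc]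
              using ih a b c (d ++ [v])
          · have hc : ((["critical", "serious", "moderate", "minor"] : List String).contains
                ((PySem.Dict.mk v).getD "impact" "moderate")) = false := by
              simp [h1, h2, h3, h4]
            have hn : pvNorm v = "moderate" := by simp [pvNorm, h1, h2, h3, h4]
            simpa [pvAppendAt, hc, h1, h2, h3, h4, List.filter_cons, hn, List.append_assoc]
              using ih a b (c ++ [v]) d

-- ===== VERDICT (by name: the statement is the Claim_ definition above) =====
theorem categorize_violations_spec : Claim_equal_categorize_violations := by
  intro vs _
  unfold Spec_categorize_violations categorize_violations categorize_violations_alt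
  rw [fold_buckets]
  simp
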